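-- pv_equiv track=rewrite | github.com/tomasosarte/TUDelft-Advanced-Algorithms | Assignments/Assignment 3/ex3.py | bounded_tree_search
-- ===== SOURCE A (Python) =====
-- def bounded_tree_search(subsets, k):
--     """
--     This function implements a tree bounded search by k.
--     It receives a list of subsets and a number k, and returns
--     True if there exists a set H of size k, and False otherwise.
--
--     Args:
--         subsets (list): List of subsets.
--         k (int): Max size of H.
--
--     Returns:
--         bool: True if there exists a set H of size k, and False otherwise.
--     """
--
--     # Tree bounded search by k
--     if k < 0: return False
--
--     # All subsets are covered by H
--     if len(subsets) == 0: return True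
--
--     # Get the first subset
--     subset = subsets[0]
--
--     for components in subset:
--
--         # Remove all subsets from the subset list that contains the components
--         new_subsets = [s for s in subsets if components not in s]
--
--         # Recursive call to the bound tree search
--         exists = bounded_tree_search(new_subsets, k - 1)
--
--         # If exists, return True
--         if exists: return True
--
--     # If not exists, return False
--     return False
-- ===== SOURCE B (Python) =====
-- def bounded_tree_search(subsets, k):
--     # Iterative DFS: an explicit stack of (subsets, k, i) states, where i is the
--     # index of the next component of subsets[0] to branch on.
--     stack = [(subsets, k, 0)]
--     while stack:
--         subs, kk, i = stack.pop()
--         if kk < 0: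
--             continue
--         if len(subs) == 0:
--             return True
--         first = subs[0]
--         if i < len(first):
--             c = first[i]
--             stack.append((subs, kk, i + 1))
--             stack.append(([s for s in subs if c not in s], kk - 1, 0))
--     return False
-- ===== Notes on version B (the rewrite author's own statement) =====
-- stated objective: alternative
-- what changed: Replaces the recursive bounded search tree by an iterative depth-first traversal over an explicit stack of (subsets, k) states.
import Mathlib
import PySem

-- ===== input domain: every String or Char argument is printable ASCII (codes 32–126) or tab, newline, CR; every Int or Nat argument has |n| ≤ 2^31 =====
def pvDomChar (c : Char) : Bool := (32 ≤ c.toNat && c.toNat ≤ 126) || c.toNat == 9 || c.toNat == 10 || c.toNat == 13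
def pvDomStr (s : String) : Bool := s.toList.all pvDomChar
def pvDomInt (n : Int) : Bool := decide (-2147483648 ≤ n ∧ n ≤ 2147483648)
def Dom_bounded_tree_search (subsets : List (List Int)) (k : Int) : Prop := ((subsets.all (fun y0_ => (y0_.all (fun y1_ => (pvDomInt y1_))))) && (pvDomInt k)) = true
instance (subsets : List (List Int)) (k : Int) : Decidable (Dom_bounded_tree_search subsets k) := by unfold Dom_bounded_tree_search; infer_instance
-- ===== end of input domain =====

-- B replaces A's recursion by an iterative DFS over an explicit stack of (subsets, k, next-branch-index) states (alternative decomposition, same cost).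

-- ===== PORT A =====
-- Literal port of A's recursion; the for-loop with early `return True` is `List.any`.
def bounded_tree_search (subsets : List (List Int)) (k : Int) : Bool :=
  if k < 0 then false
  else
    match subsets with
    | [] => true
    | subset :: rest =>
      subset.any (fun c =>
        bounded_tree_search ((subset :: rest).filter (fun s => !s.contains c)) (k - 1))
termination_by (k + 1).toNat
decreasing_by omega

-- ===== PORT B =====
-- Exact number of iterations B's stack loop spends on one state; used only as the
-- fuel that makes the while-loop total (a totality guard, not a change of algorithm).
def pvCnt (subs : List (List Int)) (kk : Int) (i : Nat) : Nat :=
  if kk < 0 then 1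
  else
    match subs with
    | [] => 1
    | first :: rest =>
      if h : i < first.length then
        1 + pvCnt ((first :: rest).filter (fun s => !s.contains first[i])) (kk - 1) 0
          + pvCnt (first :: rest) kk (i + 1)
      else 1
termination_by ((kk + 1).toNat, (subs.headD []).length - i)
decreasing_by
  · exact Prod.Lex.left _ _ (by omega)
  · exact Prod.Lex.right _ (by simp; omega)

-- The while-loop of Source B; the list head is the top of the stack (Python's list end).
-- Pop (subs, kk, i); skip if kk < 0; succeed if subs is empty; otherwise, if the
-- branch index i is still in range of the first subset, push the resume state
-- (subs, kk, i+1) and then the child state on top.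
def pvLoop : Nat → List (List (List Int) × Int × Nat) → Bool
  | _, [] => false
  | 0, _ :: _ => false   -- fuel exhausted (never reached with the fuel below)
  | fuel + 1, (subs, kk, i) :: stack =>
    if kk < 0 then pvLoop fuel stack
    else
      match subs with
      | [] => true
      | first :: rest =>
        if h : i < first.length then
          pvLoop fuel
            (((first :: rest).filter (fun s => !s.contains first[i]), kk - 1, 0)
              :: (first :: rest, kk, i + 1) :: stack)
        else pvLoop fuel stack

def bounded_tree_search_alt (subsets : List (List Int)) (k : Int) : Bool :=
  pvLoop (pvCnt subsets k 0) [(subsets, k, 0)]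

-- ===== PRECONDITION & SPEC =====
def Spec_bounded_tree_search (subsets : List (List Int)) (k : Int) (out : Bool) : Prop := out = bounded_tree_search_alt subsets k
instance (subsets : List (List Int)) (k : Int) (out : Bool) : Decidable (Spec_bounded_tree_search subsets k out) := by unfold Spec_bounded_tree_search; infer_instance

-- ===== CLAIM (what is proved, stated in full; the proofs are below) =====
def Claim_equal_bounded_tree_search : Prop := ∀ (subsets : List (List Int)) (k : Int), Dom_bounded_tree_search subsets k → Spec_bounded_tree_search subsets k (bounded_tree_search subsets k)

-- ===== LEMMAS AND PROOFS =====

-- Meaning of one stack state: what A's search returns from branch index i onward.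
def pvMean (p : List (List Int) × Int × Nat) : Bool :=
  if p.2.1 < 0 then false
  else
    match p.1 with
    | [] => true
    | first :: rest =>
      (first.drop p.2.2).any (fun c =>
        bounded_tree_search ((first :: rest).filter (fun s => !s.contains c)) (p.2.1 - 1))

theorem pvMean_zero (subs : List (List Int)) (kk : Int) :
    pvMean (subs, kk, 0) = bounded_tree_search subs kk := by
  rw [bounded_tree_search.eq_def]
  unfold pvMean
  cases subs <;> simp

def pvCntStack (st : List (List (List Int) × Int × Nat)) : Nat :=
  (st.map (fun p => pvCnt p.1 p.2.1 p.2.2)).sum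

theorem pvCnt_pos (subs : List (List Int)) (kk : Int) (i : Nat) : 1 ≤ pvCnt subs kk i := by
  rw [pvCnt.eq_def]
  split
  · exact le_refl 1
  · cases subs with
    | nil => exact le_refl 1
    | cons a l => dsimp only; split <;> omega

-- The invariant: with enough fuel, the stack loop returns `any pvMean` of the stack.
theorem pvLoop_any (fuel : Nat) :
    ∀ st : List (List (List Int) × Int × Nat), pvCntStack st ≤ fuel →
      pvLoop fuel st = st.any pvMean := by
  induction fuel with
  | zero =>
    intro st h
    cases st with
    | nil => simp [pvLoop]
    | cons p rest =>
      exfalso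
      have := pvCnt_pos p.1 p.2.1 p.2.2
      simp [pvCntStack, List.sum_cons] at h
      omega
  | succ f ih =>
    intro st h
    cases st with
    | nil => simp [pvLoop]
    | cons p rest =>
      obtain ⟨subs, kk, i⟩ := p
      have hcnt := pvCnt_pos subs kk i
      by_cases hk : kk < 0
      · have hM : pvMean (subs, kk, i) = false := by unfold pvMean; simp [hk]
        have hc : pvCnt subs kk i = 1 := by rw [pvCnt.eq_def]; simp [hk]
        have hrest : pvCntStack rest ≤ f := by
          simp [pvCntStack, List.sum_cons, hc] at h ⊢; omega
        simp [pvLoop, hk, ih rest hrest, List.any_cons, hM]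
      · cases subs with
        | nil =>
          have hM : pvMean (([] : List (List Int)), kk, i) = true := by
            unfold pvMean; simp [hk]
          simp [pvLoop, hk, List.any_cons, hM]
        | cons first rest' =>
          by_cases hi : i < first.length
          · -- push the resume state and the child state
            set child : List (List Int) :=
              (first :: rest').filter (fun s => !s.contains first[i]) with hchild
            have hc : pvCnt (first :: rest') kk i
                = 1 + pvCnt child (kk - 1) 0 + pvCnt (first :: rest') kk (i + 1) := by
              rw [pvCnt.eq_def]; simp [hk, hi, hchild]
            have hfuel : pvCntStack ((child, kk - 1, 0) :: (first :: rest', kk, i + 1) :: rest) ≤ f := by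
              simp only [pvCntStack, List.map_cons, List.sum_cons] at h ⊢
              omega
            have hdrop : first.drop i = first[i] :: first.drop (i + 1) :=
              List.drop_eq_getElem_cons hi
            have hM : pvMean (first :: rest', kk, i)
                = (pvMean (child, kk - 1, 0) || pvMean (first :: rest', kk, i + 1)) := by
              rw [pvMean_zero]
              unfold pvMean
              simp only [hk]
              rw [hdrop, List.any_cons]
              rw [bounded_tree_search.eq_def]
              by_cases hk1 : kk - 1 < 0
              · simp [hk1]
              · cases child with
                | nil => simp [hk1]
                | cons a l => simp [hk1]
            rw [show pvLoop (f + 1) ((first :: rest', kk, i) :: rest)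
                  = pvLoop f ((child, kk - 1, 0) :: (first :: rest', kk, i + 1) :: rest) by
                simp [pvLoop, hk, hi, hchild]]
            rw [ih _ hfuel]
            simp [List.any_cons, hM, Bool.or_assoc]
          · -- branch index exhausted: dead state
            have hM : pvMean (first :: rest', kk, i) = false := by
              unfold pvMean
              simp [hk, List.drop_eq_nil_of_le (by omega : first.length ≤ i)]
            have hc : pvCnt (first :: rest') kk i = 1 := by
              rw [pvCnt.eq_def]; simp [hk, hi]
            have hrest : pvCntStack rest ≤ f := by
              simp [pvCntStack, List.sum_cons, hc] at h ⊢; omega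
            simp [pvLoop, hk, hi, ih rest hrest, List.any_cons, hM]

-- ===== VERDICT (by name: the statement is the Claim_ definition above) =====
theorem bounded_tree_search_spec : Claim_equal_bounded_tree_search := by
  intro subsets k _
  unfold Spec_bounded_tree_search bounded_tree_search_alt
  rw [pvLoop_any (pvCnt subsets k 0) [(subsets, k, 0)] (by simp [pvCntStack])]
  simp [pvMean_zero]
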